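-- pv_equiv track=rewrite | github.com/Zeqiang-Lai/Foundation-of-nlp | assignment1/pos/utilities.py | index_corpus
-- ===== SOURCE A (Python) =====
-- def index_corpus(corpus):
--     obsv2idx, idx2obsv = {}, {}
--     hide2idx, idx2hide = {}, {}
--     obsv_idx, hide_idx = 0, 0
--
--     # build dictionaries and indexing
--     idxed_corpus = []
--     for seq in corpus:
--         idxed_seq = []
--         for obsv, hide in seq:
--             if obsv not in obsv2idx.keys():
--                 obsv2idx[obsv] = obsv_idx
--                 idx2obsv[obsv_idx] = obsv
--                 obsv_idx += 1
--             if hide not in hide2idx.keys():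
--                 hide2idx[hide] = hide_idx
--                 idx2hide[hide_idx] = hide
--                 hide_idx += 1
--             # indexing
--             idxed_seq.append((obsv2idx[obsv], hide2idx[hide]))
--         idxed_corpus.append(idxed_seq)
--
--     return idxed_corpus, (obsv2idx, idx2obsv), (hide2idx, idx2hide)
-- ===== SOURCE B (Python) =====
-- def index_corpus(corpus):
--     # Vocabulary = first occurrences of each symbol in stream order; id = position in it.
--     tokens = [tok for seq in corpus for tok in seq]
--     obsv_vocab = list(dict.fromkeys(o for o, _ in tokens))
--     hide_vocab = list(dict.fromkeys(h for _, h in tokens))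
--     obsv2idx = {w: i for i, w in enumerate(obsv_vocab)}
--     idx2obsv = dict(enumerate(obsv_vocab))
--     hide2idx = {t: i for i, t in enumerate(hide_vocab)}
--     idx2hide = dict(enumerate(hide_vocab))
--     idxed_corpus = [[(obsv2idx[o], hide2idx[h]) for o, h in seq] for seq in corpus]
--     return idxed_corpus, (obsv2idx, idx2obsv), (hide2idx, idx2hide)
-- ===== Notes on version B (the rewrite author's own statement) =====
-- stated objective: alternative
-- what changed: A assigns ids online: one nested loop with two explicit counters, membership tests and conditional inserts into four dicts interleaved with encoding; B has no counters and no membership tests: it flattens the corpus to a token stream, computes the two vocabularies as order-preserving dedups (dict.fromkeys), derives all four dictionaries from the vocabulary lists by enumerate (id = position in the vocabulary), and encodes by pure lookup.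
import Mathlib
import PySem

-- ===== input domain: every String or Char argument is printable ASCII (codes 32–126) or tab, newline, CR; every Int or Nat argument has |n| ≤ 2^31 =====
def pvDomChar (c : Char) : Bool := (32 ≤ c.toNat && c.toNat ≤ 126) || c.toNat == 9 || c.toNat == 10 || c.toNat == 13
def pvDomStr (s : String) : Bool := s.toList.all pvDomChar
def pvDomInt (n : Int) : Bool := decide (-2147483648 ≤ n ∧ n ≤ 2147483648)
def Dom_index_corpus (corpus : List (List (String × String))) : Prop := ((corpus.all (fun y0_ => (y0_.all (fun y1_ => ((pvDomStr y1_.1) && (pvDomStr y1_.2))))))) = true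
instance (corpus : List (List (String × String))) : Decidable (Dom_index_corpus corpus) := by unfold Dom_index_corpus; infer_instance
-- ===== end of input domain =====

-- B replaces A's online id assignment (nested loop, two counters, membership tests,
-- conditional inserts) by a staged pipeline: flatten, dedup into vocabulary lists,
-- enumerate for ids, lookup-only encoding; same values, same cost.

-- ===== PORT A =====
-- A's inner-loop body: membership tests, conditional id assignment (both directions), counter bumps, then the indexed append.
-- `obsv2idx[obsv]` / `hide2idx[hide]` after the conditional inserts: the key is always present, so getD 0 is exact.
def pvTokA (p : (PySem.Dict String Int × PySem.Dict Int String × PySem.Dict String Int × PySem.Dict Int String × Int × Int) × List (Int × Int))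
    (tok : String × String) :
    (PySem.Dict String Int × PySem.Dict Int String × PySem.Dict String Int × PySem.Dict Int String × Int × Int) × List (Int × Int) :=
  match p, tok with
  | ((o2i, i2o, h2i, i2h, oi, hi), acc), (obsv, hide) =>
    let o2i' := if o2i.contains obsv then o2i else o2i.insert obsv oi
    let i2o' := if o2i.contains obsv then i2o else i2o.insert oi obsv
    let oi'  := if o2i.contains obsv then oi else oi + 1
    let h2i' := if h2i.contains hide then h2i else h2i.insert hide hi
    let i2h' := if h2i.contains hide then i2h else i2h.insert hi hide
    let hi'  := if h2i.contains hide then hi else hi + 1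
    ((o2i', i2o', h2i', i2h', oi', hi'), acc ++ [(o2i'.getD obsv 0, h2i'.getD hide 0)])

-- A's outer-loop body: run the inner loop with a fresh idxed_seq, append it to idxed_corpus.
def pvSeqA (p : (PySem.Dict String Int × PySem.Dict Int String × PySem.Dict String Int × PySem.Dict Int String × Int × Int) × List (List (Int × Int)))
    (seq : List (String × String)) :
    (PySem.Dict String Int × PySem.Dict Int String × PySem.Dict String Int × PySem.Dict Int String × Int × Int) × List (List (Int × Int)) :=
  let r := seq.foldl pvTokA (p.1, [])
  (r.1, p.2 ++ [r.2])

def index_corpus (corpus : List (List (String × String))) : (List (List (Int × Int))) × ((List (String × Int)) × (List (Int × String))) × ((List (String × Int)) × (List (Int × String))) :=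
  let r := corpus.foldl pvSeqA ((PySem.Dict.empty, PySem.Dict.empty, PySem.Dict.empty, PySem.Dict.empty, 0, 0), [])
  match r with
  | ((o2i, i2o, h2i, i2h, _, _), idxed) => (idxed, (o2i.items, i2o.items), (h2i.items, i2h.items))

-- ===== PORT B =====
-- Source B: flatten; dict.fromkeys dedup (= PySem.List.dedup); ids by enumerate; encode by lookup.
def index_corpus_alt (corpus : List (List (String × String))) : (List (List (Int × Int))) × ((List (String × Int)) × (List (Int × String))) × ((List (String × Int)) × (List (Int × String))) :=
  let tokens := corpus.flatMap (fun seq => seq)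
  let obsvVocab := PySem.List.dedup (tokens.map (fun t => t.1))
  let hideVocab := PySem.List.dedup (tokens.map (fun t => t.2))
  let obsv2idx := PySem.Dict.ofList ((PySem.List.enumerate obsvVocab).map (fun p => (p.2, p.1)))
  let idx2obsv := PySem.Dict.ofList (PySem.List.enumerate obsvVocab)
  let hide2idx := PySem.Dict.ofList ((PySem.List.enumerate hideVocab).map (fun p => (p.2, p.1)))
  let idx2hide := PySem.Dict.ofList (PySem.List.enumerate hideVocab)
  let idxed := corpus.map (fun seq => seq.map (fun t => (obsv2idx.getD t.1 0, hide2idx.getD t.2 0)))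
  (idxed, (obsv2idx.items, idx2obsv.items), (hide2idx.items, idx2hide.items))

-- ===== PRECONDITION & SPEC =====
def Spec_index_corpus (corpus : List (List (String × String))) (out : (List (List (Int × Int))) × ((List (String × Int)) × (List (Int × String))) × ((List (String × Int)) × (List (Int × String)))) : Prop := out = index_corpus_alt corpus
instance (corpus : List (List (String × String))) (out : (List (List (Int × Int))) × ((List (String × Int)) × (List (Int × String))) × ((List (String × Int)) × (List (Int × String)))) : Decidable (Spec_index_corpus corpus out) := by unfold Spec_index_corpus; infer_instance

-- ===== CLAIM (what is proved, stated in full; the proofs are below) =====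
def Claim_equal_index_corpus : Prop := ∀ (corpus : List (List (String × String))), Dom_index_corpus corpus → Spec_index_corpus corpus (index_corpus corpus)

-- ===== LEMMAS AND PROOFS =====

-- PROOF DEVICE: A's conditional-insert step on one dict (the common shape of both of A's vocabularies)
def pvStep (d : PySem.Dict String Int) (k : String) : PySem.Dict String Int :=
  if d.contains k then d else d.insert k (d.size : Int)

-- and on the pair of dicts (A's obsv/hide state, forward direction only)
def pvVocabTok (s : PySem.Dict String Int × PySem.Dict String Int) (tok : String × String) :
    PySem.Dict String Int × PySem.Dict String Int :=
  (pvStep s.1 tok.1, pvStep s.2 tok.2)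

-- mirror of a string→int dict as an int→string dict (A's idx2* dicts track this shape)
def pvMirror (d : PySem.Dict String Int) : PySem.Dict Int String :=
  PySem.Dict.mk (d.items.map (fun p => (p.2, p.1)))

-- A's full dict state as a function of the two forward dictionaries
def pvPack (s : PySem.Dict String Int × PySem.Dict String Int) :
    PySem.Dict String Int × PySem.Dict Int String × PySem.Dict String Int × PySem.Dict Int String × Int × Int :=
  (s.1, pvMirror s.1, s.2, pvMirror s.2, (s.1.items.length : Int), (s.2.items.length : Int))

-- invariant: values are exactly 0..n-1 in order, keys distinct
def pvGood (d : PySem.Dict String Int) : Prop :=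
  d.values = (List.range d.items.length).map Int.ofNat ∧ d.keys.Nodup

theorem pvGood_empty : pvGood PySem.Dict.empty := by
  constructor <;> simp [PySem.Dict.values, PySem.Dict.keys, PySem.Dict.empty]

theorem pvGood_step (d : PySem.Dict String Int) (k : String) (h : pvGood d) :
    pvGood (pvStep d k) := by
  unfold pvStep
  split
  · exact h
  · next hc =>
    have hnc : d.contains k = false := by simpa using hc
    obtain ⟨hv, hk⟩ := h
    refine ⟨?_, PySem.Dict.nodup_keys_insert d k _ hk⟩
    have hi := PySem.Dict.items_insert_of_not_contains d ((d.size : Nat) : Int) hnc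
    simp only [PySem.Dict.values] at hv ⊢
    rw [hi]
    simp [List.range_succ, hv, PySem.Dict.size]

-- one pvStep: items stay "enumerate of the keys, swapped", keys evolve by Set.add
theorem pvStep_items (d : PySem.Dict String Int) (k : String)
    (h : d.items = (PySem.List.enumerate d.keys).map (fun p => (p.2, p.1))) :
    (pvStep d k).items = (PySem.List.enumerate (PySem.Set.add d.keys k)).map (fun p => (p.2, p.1)) := by
  unfold pvStep
  by_cases hc : d.contains k = true
  · have hm : k ∈ d.keys := by
      rw [PySem.Dict.contains_eq_decide_mem_keys] at hc
      simpa using hc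
    simp [hc, PySem.Set.add, PySem.Set.contains, hm, h]
  · have hc' : d.contains k = false := by simpa using hc
    have hm : k ∉ d.keys := by
      rw [PySem.Dict.contains_eq_decide_mem_keys] at hc'
      simpa using hc'
    have hlen : d.size = d.keys.length := by
      simp [PySem.Dict.size, PySem.Dict.keys]
    simp only [hc', Bool.false_eq_true, if_false]
    rw [PySem.Dict.items_insert_of_not_contains _ _ hc', h]
    have hadd : PySem.Set.add d.keys k = d.keys ++ [k] := by
      simp [PySem.Set.add, PySem.Set.contains, hm]
    rw [hadd, PySem.List.enumerate_append]
    simp [PySem.List.enumerate_cons, hlen]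

theorem pvStep_keys (d : PySem.Dict String Int) (k : String) :
    (pvStep d k).keys = PySem.Set.add d.keys k := by
  unfold pvStep
  by_cases hc : d.contains k = true
  · have hm : k ∈ d.keys := by
      rw [PySem.Dict.contains_eq_decide_mem_keys] at hc
      simpa using hc
    simp [hc, PySem.Set.add, PySem.Set.contains, hm]
  · have hc' : d.contains k = false := by simpa using hc
    have hm : k ∉ d.keys := by
      rw [PySem.Dict.contains_eq_decide_mem_keys] at hc'
      simpa using hc'
    simp only [hc', Bool.false_eq_true, if_false]
    rw [PySem.Dict.keys_insert_of_not_contains _ _ hc']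
    simp [PySem.Set.add, PySem.Set.contains, hm]

-- the whole fold of pvStep: items = enumerate of the dedup-updated keys, swapped
theorem pvFold_items (xs : List String) (d : PySem.Dict String Int)
    (h : d.items = (PySem.List.enumerate d.keys).map (fun p => (p.2, p.1))) :
    (xs.foldl pvStep d).items = (PySem.List.enumerate (PySem.Set.update d.keys xs)).map (fun p => (p.2, p.1)) := by
  induction xs generalizing d with
  | nil => simpa [PySem.Set.update] using h
  | cons x rest ih =>
    have h1 : (pvStep d x).items = (PySem.List.enumerate (pvStep d x).keys).map (fun p => (p.2, p.1)) := by
      rw [pvStep_keys]; exact pvStep_items d x h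
    rw [List.foldl_cons, ih (pvStep d x) h1, pvStep_keys]
    rfl

-- A's paired fold splits componentwise into two pvStep folds over the projected streams
theorem pvSeqSplit (seq : List (String × String)) (s : PySem.Dict String Int × PySem.Dict String Int) :
    seq.foldl pvVocabTok s = ((seq.map (fun t => t.1)).foldl pvStep s.1, (seq.map (fun t => t.2)).foldl pvStep s.2) := by
  induction seq generalizing s with
  | nil => rfl
  | cons t rest ih => simpa using ih (pvVocabTok s t)

theorem pvCorpusSplit (corpus : List (List (String × String))) (s : PySem.Dict String Int × PySem.Dict String Int) :
    corpus.foldl (fun d seq => seq.foldl pvVocabTok d) s =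
      (((corpus.flatMap (fun seq => seq)).map (fun t => t.1)).foldl pvStep s.1,
       ((corpus.flatMap (fun seq => seq)).map (fun t => t.2)).foldl pvStep s.2) := by
  induction corpus generalizing s with
  | nil => rfl
  | cons seq rest ih =>
    simp only [List.foldl_cons, List.flatMap_cons, List.map_append, List.foldl_append]
    rw [ih (seq.foldl pvVocabTok s), pvSeqSplit]

-- contains is monotone along the vocabulary fold, and getD of a contained key is stable
theorem pvStep_contains (d : PySem.Dict String Int) (j k : String)
    (h : d.contains k = true) : (pvStep d j).contains k = true := by
  unfold pvStep
  split
  · exact h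
  · simp [PySem.Dict.contains_insert, h]

theorem pvStep_getD (d : PySem.Dict String Int) (j k : String)
    (h : d.contains k = true) : (pvStep d j).getD k 0 = d.getD k 0 := by
  unfold pvStep
  split
  · rfl
  · next hj =>
    rw [PySem.Dict.getD_insert]
    split
    · next he => rw [he] at h; simp [h] at hj
    · rfl

theorem pvSeqFold_stable (seq : List (String × String)) (s : PySem.Dict String Int × PySem.Dict String Int)
    (k : String) :
    (s.1.contains k = true → (seq.foldl pvVocabTok s).1.contains k = true ∧ (seq.foldl pvVocabTok s).1.getD k 0 = s.1.getD k 0) ∧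
    (s.2.contains k = true → (seq.foldl pvVocabTok s).2.contains k = true ∧ (seq.foldl pvVocabTok s).2.getD k 0 = s.2.getD k 0) := by
  induction seq generalizing s with
  | nil => exact ⟨fun h => ⟨h, rfl⟩, fun h => ⟨h, rfl⟩⟩
  | cons t rest ih =>
    refine ⟨fun h => ?_, fun h => ?_⟩
    · have h1 := pvStep_contains s.1 t.1 k h
      have h2 := pvStep_getD s.1 t.1 k h
      have := (ih (pvVocabTok s t)).1 h1
      exact ⟨this.1, by rw [List.foldl_cons]; rw [this.2]; exact h2⟩
    · have h1 := pvStep_contains s.2 t.2 k h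
      have h2 := pvStep_getD s.2 t.2 k h
      have := (ih (pvVocabTok s t)).2 h1
      exact ⟨this.1, by rw [List.foldl_cons]; rw [this.2]; exact h2⟩

theorem pvCorpusFold_stable (corpus : List (List (String × String))) (s : PySem.Dict String Int × PySem.Dict String Int)
    (k : String) :
    (s.1.contains k = true → (corpus.foldl (fun d seq => seq.foldl pvVocabTok d) s).1.contains k = true ∧ (corpus.foldl (fun d seq => seq.foldl pvVocabTok d) s).1.getD k 0 = s.1.getD k 0) ∧
    (s.2.contains k = true → (corpus.foldl (fun d seq => seq.foldl pvVocabTok d) s).2.contains k = true ∧ (corpus.foldl (fun d seq => seq.foldl pvVocabTok d) s).2.getD k 0 = s.2.getD k 0) := by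
  induction corpus generalizing s with
  | nil => exact ⟨fun h => ⟨h, rfl⟩, fun h => ⟨h, rfl⟩⟩
  | cons seq rest ih =>
    refine ⟨fun h => ?_, fun h => ?_⟩
    · have hs := (pvSeqFold_stable seq s k).1 h
      have := (ih (seq.foldl pvVocabTok s)).1 hs.1
      exact ⟨this.1, by simpa [this.2] using hs.2⟩
    · have hs := (pvSeqFold_stable seq s k).2 h
      have := (ih (seq.foldl pvVocabTok s)).2 hs.1
      exact ⟨this.1, by simpa [this.2] using hs.2⟩

-- every token of seq is contained in the state after folding seq
theorem pvSeqFold_mem (seq : List (String × String)) (s : PySem.Dict String Int × PySem.Dict String Int)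
    (t : String × String) (ht : t ∈ seq) :
    (seq.foldl pvVocabTok s).1.contains t.1 = true ∧ (seq.foldl pvVocabTok s).2.contains t.2 = true := by
  induction seq generalizing s with
  | nil => cases ht
  | cons u rest ih =>
    simp only [List.foldl_cons]
    rcases List.mem_cons.mp ht with h | h
    · subst h
      have c1 : (pvVocabTok s t).1.contains t.1 = true := by
        simp only [pvVocabTok, pvStep]; split
        · assumption
        · exact PySem.Dict.contains_insert_self _ _ _
      have c2 : (pvVocabTok s t).2.contains t.2 = true := by
        simp only [pvVocabTok, pvStep]; split
        · assumption
        · exact PySem.Dict.contains_insert_self _ _ _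
      exact ⟨((pvSeqFold_stable rest (pvVocabTok s t) t.1).1 c1).1,
             ((pvSeqFold_stable rest (pvVocabTok s t) t.2).2 c2).1⟩
    · exact ih (pvVocabTok s u) h

-- the fresh id (= current length) is never a key of the mirror dict of a good dict
theorem pvMirror_fresh (d : PySem.Dict String Int) (h : pvGood d) :
    (pvMirror d).contains ((d.items.length : Nat) : Int) = false := by
  obtain ⟨hv, -⟩ := h
  rw [PySem.Dict.contains_eq_decide_mem_keys]
  simp only [pvMirror, PySem.Dict.keys_mk, List.map_map]
  have hv' : d.items.map (fun p => p.2) = (List.range d.items.length).map Int.ofNat := hv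
  rw [decide_eq_false_iff_not]
  simp only [Function.comp_def]
  rw [hv']
  simp only [List.mem_map, List.mem_range]
  rintro ⟨a, ha, hae⟩
  rw [Int.ofNat_eq_natCast] at hae
  have : a = d.items.length := by exact_mod_cast hae
  omega

-- inserting a fresh key with its fresh id commutes with taking the mirror
theorem pvMirror_insert (d : PySem.Dict String Int) (k : String) (h : pvGood d)
    (hnc : d.contains k = false) :
    (pvMirror d).insert ((d.items.length : Nat) : Int) k
      = pvMirror (d.insert k ((d.items.length : Nat) : Int)) := by
  apply PySem.Dict.ext
  rw [PySem.Dict.items_insert_of_not_contains _ _ (pvMirror_fresh d h)]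
  simp [pvMirror, PySem.Dict.items_insert_of_not_contains d _ hnc]

-- one token of A, from a packed good state, is the vocabulary step plus the encode of that token
theorem pvTokA_pack (s : PySem.Dict String Int × PySem.Dict String Int) (tok : String × String)
    (acc : List (Int × Int)) (h1 : pvGood s.1) (h2 : pvGood s.2) :
    pvTokA (pvPack s, acc) tok =
      (pvPack (pvVocabTok s tok),
       acc ++ [((pvVocabTok s tok).1.getD tok.1 0, (pvVocabTok s tok).2.getD tok.2 0)]) := by
  obtain ⟨o2i, h2i⟩ := s
  obtain ⟨o, hd⟩ := tok
  simp only [pvTokA, pvVocabTok, pvStep, pvPack, PySem.Dict.size]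
  cases c1 : o2i.contains o <;> cases c2 : h2i.contains hd
  · have hm1 := pvMirror_insert o2i o h1 c1
    have hm2 := pvMirror_insert h2i hd h2 c2
    have hl1 : (((o2i.insert o ((o2i.items.length : Nat) : Int)).items.length : Nat) : Int)
        = ((o2i.items.length : Nat) : Int) + 1 := by
      rw [PySem.Dict.items_insert_of_not_contains _ _ c1]; simp
    have hl2 : (((h2i.insert hd ((h2i.items.length : Nat) : Int)).items.length : Nat) : Int)
        = ((h2i.items.length : Nat) : Int) + 1 := by
      rw [PySem.Dict.items_insert_of_not_contains _ _ c2]; simp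
    simp [hm1, hm2, hl1, hl2]
  · have hm := pvMirror_insert o2i o h1 c1
    have hl : (((o2i.insert o ((o2i.items.length : Nat) : Int)).items.length : Nat) : Int)
        = ((o2i.items.length : Nat) : Int) + 1 := by
      rw [PySem.Dict.items_insert_of_not_contains _ _ c1]; simp
    simp [hm, hl]
  · have hm := pvMirror_insert h2i hd h2 c2
    have hl : (((h2i.insert hd ((h2i.items.length : Nat) : Int)).items.length : Nat) : Int)
        = ((h2i.items.length : Nat) : Int) + 1 := by
      rw [PySem.Dict.items_insert_of_not_contains _ _ c2]; simp
    simp [hm, hl]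
  · simp

-- A's inner loop from a packed good state = packed end state + encode of seq with the end-of-seq dicts
theorem pvSeqA_pack (seq : List (String × String)) (s : PySem.Dict String Int × PySem.Dict String Int)
    (acc : List (Int × Int)) (h1 : pvGood s.1) (h2 : pvGood s.2) :
    seq.foldl pvTokA (pvPack s, acc) =
      (pvPack (seq.foldl pvVocabTok s),
       acc ++ seq.map (fun t => ((seq.foldl pvVocabTok s).1.getD t.1 0, (seq.foldl pvVocabTok s).2.getD t.2 0))) := by
  induction seq generalizing s acc with
  | nil => simp
  | cons t rest ih =>
    simp only [List.foldl_cons, List.map_cons]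
    rw [pvTokA_pack s t acc h1 h2]
    have hg1 := pvGood_step s.1 t.1 h1
    have hg2 := pvGood_step s.2 t.2 h2
    rw [ih (pvVocabTok s t) _ hg1 hg2]
    have hc1 : (pvVocabTok s t).1.contains t.1 = true := by
      simp only [pvVocabTok, pvStep]; split
      · assumption
      · exact PySem.Dict.contains_insert_self _ _ _
    have hc2 : (pvVocabTok s t).2.contains t.2 = true := by
      simp only [pvVocabTok, pvStep]; split
      · assumption
      · exact PySem.Dict.contains_insert_self _ _ _
    have e1 := ((pvSeqFold_stable rest (pvVocabTok s t) t.1).1 hc1).2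
    have e2 := ((pvSeqFold_stable rest (pvVocabTok s t) t.2).2 hc2).2
    simp [e1, e2]

-- pvGood is preserved along the vocabulary folds
theorem pvSeqFold_good (seq : List (String × String)) (s : PySem.Dict String Int × PySem.Dict String Int)
    (h1 : pvGood s.1) (h2 : pvGood s.2) :
    pvGood (seq.foldl pvVocabTok s).1 ∧ pvGood (seq.foldl pvVocabTok s).2 := by
  induction seq generalizing s with
  | nil => exact ⟨h1, h2⟩
  | cons t rest ih => exact ih (pvVocabTok s t) (pvGood_step s.1 t.1 h1) (pvGood_step s.2 t.2 h2)

-- A's outer loop from a packed good state = packed end state + encode of corpus with the final dicts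
theorem pvCorpusA_pack (corpus : List (List (String × String))) (s : PySem.Dict String Int × PySem.Dict String Int)
    (acc : List (List (Int × Int))) (h1 : pvGood s.1) (h2 : pvGood s.2) :
    corpus.foldl pvSeqA (pvPack s, acc) =
      (pvPack (corpus.foldl (fun d seq => seq.foldl pvVocabTok d) s),
       acc ++ corpus.map (fun seq => seq.map (fun t =>
         ((corpus.foldl (fun d sq => sq.foldl pvVocabTok d) s).1.getD t.1 0,
          (corpus.foldl (fun d sq => sq.foldl pvVocabTok d) s).2.getD t.2 0)))) := by
  induction corpus generalizing s acc with
  | nil => simp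
  | cons seq rest ih =>
    simp only [List.foldl_cons, List.map_cons]
    have hgs := pvSeqFold_good seq s h1 h2
    have hstep : pvSeqA (pvPack s, acc) seq
        = (pvPack (seq.foldl pvVocabTok s),
           acc ++ [seq.map (fun t => ((seq.foldl pvVocabTok s).1.getD t.1 0, (seq.foldl pvVocabTok s).2.getD t.2 0))]) := by
      simp only [pvSeqA]
      rw [pvSeqA_pack seq s [] h1 h2]
      simp
    rw [hstep, ih (seq.foldl pvVocabTok s) _ hgs.1 hgs.2]
    have henc : seq.map (fun t => ((seq.foldl pvVocabTok s).1.getD t.1 0, (seq.foldl pvVocabTok s).2.getD t.2 0))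
        = seq.map (fun t =>
            ((rest.foldl (fun d sq => sq.foldl pvVocabTok d) (seq.foldl pvVocabTok s)).1.getD t.1 0,
             (rest.foldl (fun d sq => sq.foldl pvVocabTok d) (seq.foldl pvVocabTok s)).2.getD t.2 0)) := by
      apply List.map_congr_left
      intro t ht
      have hm := pvSeqFold_mem seq s t ht
      have k1 := ((pvCorpusFold_stable rest (seq.foldl pvVocabTok s) t.1).1 hm.1).2
      have k2 := ((pvCorpusFold_stable rest (seq.foldl pvVocabTok s) t.2).2 hm.2).2
      rw [k1, k2]
    rw [henc]
    simp

-- ofList of a list with distinct firsts is just that list as items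
theorem pvItems_ofList {κ ν : Type} [BEq κ] [LawfulBEq κ] (l : List (κ × ν))
    (h : (l.map Prod.fst).Nodup) : (PySem.Dict.ofList l).items = l := by
  have hfresh : ∀ a ∈ l, (PySem.Dict.empty : PySem.Dict κ ν).contains a.1 = false :=
    fun a _ => PySem.Dict.contains_empty _
  have := PySem.Dict.items_foldl_insert_fresh l Prod.fst Prod.snd PySem.Dict.empty hfresh h
  simpa using this

-- firsts of an enumerate are strictly increasing, hence nodup
theorem pvNodup_enum_fst {α : Type} (xs : List α) (s : Int) :
    ((PySem.List.enumerate xs s).map Prod.fst).Nodup := by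
  have := PySem.List.pairwise_lt_enumerate xs s
  exact (List.Pairwise.map Prod.fst (fun a b hab => hab) this).imp (fun h => ne_of_lt h)

-- the final A-side vocabulary dict: items = swapped enumerate of the dedup'd projected stream
theorem pvFoldEmpty_items (xs : List String) :
    (xs.foldl pvStep PySem.Dict.empty).items
      = (PySem.List.enumerate (PySem.List.dedup xs)).map (fun p => (p.2, p.1)) := by
  have h := pvFold_items xs PySem.Dict.empty (by simp [PySem.Dict.empty, PySem.Dict.keys])
  rw [h]
  congr 1

-- ===== VERDICT (by name: the statement is the Claim_ definition above) =====
theorem index_corpus_spec : Claim_equal_index_corpus := by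
  intro corpus _
  show index_corpus corpus = index_corpus_alt corpus
  have hE : pvGood (PySem.Dict.empty : PySem.Dict String Int) := pvGood_empty
  have h := pvCorpusA_pack corpus (PySem.Dict.empty, PySem.Dict.empty) [] hE hE
  simp only [index_corpus, index_corpus_alt]
  rw [show ((PySem.Dict.empty, PySem.Dict.empty, PySem.Dict.empty, PySem.Dict.empty, (0 : Int), (0 : Int)),
      ([] : List (List (Int × Int)))) = (pvPack (PySem.Dict.empty, PySem.Dict.empty), ([] : List (List (Int × Int)))) from rfl]
  rw [h]
  -- split the nested fold into the two projected-stream folds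
  rw [pvCorpusSplit]
  simp only [pvPack, List.nil_append]
  -- identify A's final dicts with B's enumerate-built dicts
  have eO := pvFoldEmpty_items ((corpus.flatMap (fun seq => seq)).map (fun t => t.1))
  have eH := pvFoldEmpty_items ((corpus.flatMap (fun seq => seq)).map (fun t => t.2))
  have ndO : (((PySem.List.enumerate (PySem.List.dedup ((corpus.flatMap (fun seq => seq)).map (fun t => t.1)))).map (fun p => (p.2, p.1))).map Prod.fst).Nodup := by
    rw [List.map_map]
    have h2 : ((PySem.List.enumerate (PySem.List.dedup ((corpus.flatMap (fun seq => seq)).map (fun t => t.1)))).map (Prod.fst ∘ fun p => (p.2, p.1))) = PySem.List.dedup ((corpus.flatMap (fun seq => seq)).map (fun t => t.1)) :=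
      PySem.List.map_snd_enumerate _ _
    rw [h2]
    exact PySem.List.nodup_dedup _
  have ndH : (((PySem.List.enumerate (PySem.List.dedup ((corpus.flatMap (fun seq => seq)).map (fun t => t.2)))).map (fun p => (p.2, p.1))).map Prod.fst).Nodup := by
    rw [List.map_map]
    have h2 : ((PySem.List.enumerate (PySem.List.dedup ((corpus.flatMap (fun seq => seq)).map (fun t => t.2)))).map (Prod.fst ∘ fun p => (p.2, p.1))) = PySem.List.dedup ((corpus.flatMap (fun seq => seq)).map (fun t => t.2)) :=
      PySem.List.map_snd_enumerate _ _
    rw [h2]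
    exact PySem.List.nodup_dedup _
  have hmirO : (pvMirror (((corpus.flatMap (fun seq => seq)).map (fun t => t.1)).foldl pvStep PySem.Dict.empty)).items
      = (PySem.Dict.ofList (PySem.List.enumerate (PySem.List.dedup ((corpus.flatMap (fun seq => seq)).map (fun t => t.1))))).items := by
    rw [pvItems_ofList _ (pvNodup_enum_fst _ _)]
    show ((((corpus.flatMap (fun seq => seq)).map (fun t => t.1)).foldl pvStep PySem.Dict.empty).items.map (fun p => (p.2, p.1))) = _
    rw [eO, List.map_map]
    simp [Function.comp_def]
  have hmirH : (pvMirror (((corpus.flatMap (fun seq => seq)).map (fun t => t.2)).foldl pvStep PySem.Dict.empty)).items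
      = (PySem.Dict.ofList (PySem.List.enumerate (PySem.List.dedup ((corpus.flatMap (fun seq => seq)).map (fun t => t.2))))).items := by
    rw [pvItems_ofList _ (pvNodup_enum_fst _ _)]
    show ((((corpus.flatMap (fun seq => seq)).map (fun t => t.2)).foldl pvStep PySem.Dict.empty).items.map (fun p => (p.2, p.1))) = _
    rw [eH, List.map_map]
    simp [Function.comp_def]
  have hdictO : ((corpus.flatMap (fun seq => seq)).map (fun t => t.1)).foldl pvStep PySem.Dict.empty
      = PySem.Dict.ofList ((PySem.List.enumerate (PySem.List.dedup ((corpus.flatMap (fun seq => seq)).map (fun t => t.1)))).map (fun p => (p.2, p.1))) := by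
    apply PySem.Dict.ext
    rw [eO, pvItems_ofList _ ndO]
  have hdictH : ((corpus.flatMap (fun seq => seq)).map (fun t => t.2)).foldl pvStep PySem.Dict.empty
      = PySem.Dict.ofList ((PySem.List.enumerate (PySem.List.dedup ((corpus.flatMap (fun seq => seq)).map (fun t => t.2)))).map (fun p => (p.2, p.1))) := by
    apply PySem.Dict.ext
    rw [eH, pvItems_ofList _ ndH]
  rw [hmirO, hmirH, hdictO, hdictH]
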